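-- pv_equiv track=rewrite | github.com/ChunBoo/JustUK | DFS_BFS/444-dfsForOneConnectedComponent.py | solve
-- ===== SOURCE A (Python) =====
-- from collections import defaultdict
--
-- def solve(matrix):
--     if not matrix:
--         return 0
--
--     rows=len(matrix)
--     data=defaultdict(int)
--     cols=len(matrix[0])
--
--     def dfs(r,c,x):
--         if r<0 or c<0 or r>=rows or c>=cols:
--             return
--         if matrix[r][c]!=x:
--             return
--         matrix[r][c]=-1
--         dfs(r-1,c,x)
--         dfs(r+1,c,x)
--         dfs(r,c-1,x)
--         dfs(r,c+1,x)
--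
--     for r in range(rows):
--         for c in range(cols):
--             if matrix[r][c]!=-1:
--                 color=matrix[r][c]
--                 dfs(r,c,color)  #must be color here
--                 data[color]+=1
--     return sum(data.values())-max(data.values())
-- ===== SOURCE B (Python) =====
-- def solve(matrix):
--     if not matrix:
--         return 0
--
--     rows = len(matrix)
--     cols = len(matrix[0])
--     data = {}
--
--     for r in range(rows):
--         for c in range(cols):
--             color = matrix[r][c]
--             if color == -1:
--                 continue
--             data[color] = data.get(color, 0) + 1
--             stack = [(r, c)]
--             while stack:
--                 i, j = stack.pop()
--                 if 0 <= i < rows and 0 <= j < cols and matrix[i][j] == color: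
--                     matrix[i][j] = -1
--                     stack.append((i, j + 1))
--                     stack.append((i, j - 1))
--                     stack.append((i + 1, j))
--                     stack.append((i - 1, j))
--
--     counts = list(data.values())
--     return sum(counts) - max(counts)
-- ===== Notes on version B (the rewrite author's own statement) =====
-- stated objective: alternative
-- what changed: The recursive four-way DFS is replaced by an iterative flood fill with an explicit stack (pop a cell, test bounds and color, overwrite with -1, push the four neighbours), keeping the same per-color component counts and the same in-place overwrite of the matrix.
import Mathlib
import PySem

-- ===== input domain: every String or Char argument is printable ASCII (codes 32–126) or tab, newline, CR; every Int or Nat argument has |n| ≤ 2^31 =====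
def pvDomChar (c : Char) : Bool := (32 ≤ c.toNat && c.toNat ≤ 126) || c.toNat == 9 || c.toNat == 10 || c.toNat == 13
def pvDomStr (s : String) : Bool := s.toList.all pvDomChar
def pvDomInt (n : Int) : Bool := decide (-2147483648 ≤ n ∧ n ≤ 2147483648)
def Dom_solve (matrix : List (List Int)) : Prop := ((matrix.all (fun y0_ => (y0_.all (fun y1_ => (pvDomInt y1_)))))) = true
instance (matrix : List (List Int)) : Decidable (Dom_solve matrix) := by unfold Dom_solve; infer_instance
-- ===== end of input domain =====

-- B replaces A's recursive four-way DFS by an iterative explicit-stack flood fill (same per-color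
-- component counts, same in-place overwrite of the matrix with -1); equivalence is about the return value.


-- ===== PORT A =====
-- matrix[r][c] / matrix[r][c] = v: in both programs every access is guarded by 0 ≤ r < rows,
-- 0 ≤ c < cols, so the total getD/set rendering below is exact on the admitted inputs.
def pvGetCell (m : List (List Int)) (r c : Int) : Int :=
  (m.getD r.toNat []).getD c.toNat 0

def pvSetCell (m : List (List Int)) (r c : Int) (v : Int) : List (List Int) :=
  m.set r.toNat ((m.getD r.toNat []).set c.toNat v)

-- A's dfs; the fuel (one unit per call frame, rows*cols cells bound the passing frames) only
-- makes the recursion total — it never runs out on the admitted inputs.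
def pvDfs (fuel : Nat) (rows cols : Int) (r c x : Int) (m : List (List Int)) : List (List Int) :=
  match fuel with
  | 0 => m
  | f+1 =>
    if r < 0 ∨ c < 0 ∨ rows ≤ r ∨ cols ≤ c then m
    else if pvGetCell m r c ≠ x then m
    else
      let m1 := pvSetCell m r c (-1)
      let m2 := pvDfs f rows cols (r-1) c x m1
      let m3 := pvDfs f rows cols (r+1) c x m2
      let m4 := pvDfs f rows cols r (c-1) x m3
      pvDfs f rows cols r (c+1) x m4

def solve (matrix : List (List Int)) : Int :=
  if matrix = [] then 0
  else
    let rowsN := matrix.length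
    let colsN := (matrix.headD []).length
    let fuel := (matrix.map List.length).sum + 2
    let fin := (List.range rowsN).foldl (fun s (r : Nat) =>
      (List.range colsN).foldl (fun (s : List (List Int) × PySem.Dict Int Int) (c : Nat) =>
        if pvGetCell s.1 (r : Int) (c : Int) ≠ -1 then
          let color := pvGetCell s.1 (r : Int) (c : Int)
          (pvDfs fuel (rowsN : Int) (colsN : Int) (r : Int) (c : Int) color s.1,
           s.2.insert color (s.2.getD color 0 + 1))
        else s) s) (matrix, PySem.Dict.empty)
    let vals := fin.2.values
    vals.sum - (PySem.List.max? vals (fun y => y)).getD 0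

-- ===== PORT B =====
-- B's while-loop over the explicit stack (list head = top of stack: the four appends of Source B put
-- (i-1,j) on top); the fuel only makes the loop total and never runs out on the admitted inputs.
def pvStackRun (fuel : Nat) (rows cols x : Int) (st : List (Int × Int)) (m : List (List Int)) :
    List (List Int) :=
  match st with
  | [] => m
  | (i, j) :: rest =>
    match fuel with
    | 0 => m
    | f+1 =>
      if 0 ≤ i ∧ i < rows ∧ 0 ≤ j ∧ j < cols ∧ pvGetCell m i j = x then
        pvStackRun f rows cols x ((i-1,j) :: (i+1,j) :: (i,j-1) :: (i,j+1) :: rest)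
          (pvSetCell m i j (-1))
      else pvStackRun f rows cols x rest m

def solve_alt (matrix : List (List Int)) : Int :=
  if matrix = [] then 0
  else
    let rowsN := matrix.length
    let colsN := (matrix.headD []).length
    let fuel := 5 * (matrix.map List.length).sum + 2
    let fin := (List.range rowsN).foldl (fun s (r : Nat) =>
      (List.range colsN).foldl (fun (s : List (List Int) × PySem.Dict Int Int) (c : Nat) =>
        let color := pvGetCell s.1 (r : Int) (c : Int)
        if color = -1 then s
        else
          (pvStackRun fuel (rowsN : Int) (colsN : Int) color [((r : Int), (c : Int))] s.1,
           s.2.insert color (s.2.getD color 0 + 1))) s) (matrix, PySem.Dict.empty)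
    let counts := fin.2.values
    counts.sum - (PySem.List.max? counts (fun y => y)).getD 0

-- ===== PRECONDITION & SPEC =====
-- Pre_ excludes exactly the inputs on which the Python A raises: a row shorter than row 0
-- (IndexError while scanning column c < cols) and a non-empty matrix whose first len(matrix[0])
-- columns contain only -1 (data stays empty and max() raises ValueError).
def Pre_solve (matrix : List (List Int)) : Prop :=
  matrix = [] ∨
  ((∀ row ∈ matrix, (matrix.headD []).length ≤ row.length) ∧
   ∃ row ∈ matrix, ∃ v ∈ row.take (matrix.headD []).length, v ≠ -1)
instance (matrix : List (List Int)) : Decidable (Pre_solve matrix) := by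
  unfold Pre_solve; infer_instance

def pvWitness_solve : List (List Int) := [[1, -1], [1, 2]]

def Spec_solve (matrix : List (List Int)) (out : Int) : Prop := out = solve_alt matrix
instance (matrix : List (List Int)) (out : Int) : Decidable (Spec_solve matrix out) := by
  unfold Spec_solve; infer_instance

-- ===== CLAIM (what is proved, stated in full; the proofs are below) =====
def Claim_equal_solve : Prop :=
  ∀ (matrix : List (List Int)), Dom_solve matrix → Pre_solve matrix →
    Spec_solve matrix (solve matrix)

-- ===== LEMMAS AND PROOFS =====

-- shape invariant: rows = number of rows, every row has at least cols entries
def pvH (rows cols : Int) (sh : List Nat) : Prop :=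
  rows = (sh.length : Int) ∧ ∀ n ∈ sh, cols ≤ (n : Int)

-- number of cells with value x (over whole rows)
def pvCnt (x : Int) (m : List (List Int)) : Nat :=
  (m.map (fun row => row.count x)).sum


-- general sum-after-set fact (no Mathlib lemma states it)
lemma pvSum_set_nat (l : List Nat) (i a : Nat) (h : i < l.length) :
    (l.set i a).sum + l[i] = l.sum + a := by
  rw [List.set_eq_take_append_cons_drop, if_pos h]
  conv_rhs => rw [show l.sum = (l.take i ++ l.drop i).sum by rw [List.take_append_drop]]
  rw [← List.getElem_cons_drop h]
  rw [List.sum_append, List.sum_append, List.sum_cons, List.sum_cons]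
  omega

lemma pvCnt_set (x : Int) (m : List (List Int)) (i : Nat) (row' : List Int)
    (h : i < m.length) :
    pvCnt x (m.set i row') + (m[i]'h).count x = pvCnt x m + row'.count x := by
  unfold pvCnt
  rw [List.map_set]
  have h' : i < (m.map (fun row => row.count x)).length := by simpa using h
  have := pvSum_set_nat (m.map (fun row => row.count x)) i (row'.count x) h'
  simpa using this

lemma pvSetCell_shape (m : List (List Int)) (r c : Int) (v : Int) :
    (pvSetCell m r c v).map List.length = m.map List.length := by
  unfold pvSetCell
  rw [List.map_set]
  rcases Nat.lt_or_ge r.toNat m.length with h | h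
  · rw [List.length_set, List.getD_eq_getElem m [] h]
    have : (m.map List.length)[r.toNat]'(by simpa using h) = m[r.toNat].length := by simp
    rw [← this, List.set_getElem_self]
  · exact List.set_eq_of_length_le (by simpa using h)

lemma pvCnt_setCell_le (m : List (List Int)) (r c x : Int) (hx : x ≠ -1) :
    pvCnt x (pvSetCell m r c (-1)) ≤ pvCnt x m := by
  unfold pvSetCell
  rcases Nat.lt_or_ge r.toNat m.length with h | h
  · have hrow : ((m.getD r.toNat []).set c.toNat (-1)).count x ≤ (m[r.toNat]'h).count x := by
      rw [List.getD_eq_getElem m [] h]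
      rcases Nat.lt_or_ge c.toNat (m[r.toNat]'h).length with hc | hc
      · rw [List.count_set hc]
        have : ((-1 : Int) == x) = false := by simpa using fun hh => hx hh.symm
        simp [this]
      · rw [List.set_eq_of_length_le hc]
    have := pvCnt_set x m r.toNat ((m.getD r.toNat []).set c.toNat (-1)) h
    omega
  · rw [List.set_eq_of_length_le h]

lemma pvCnt_setCell (m : List (List Int)) (r c x : Int)
    (hr2 : r.toNat < m.length)
    (hc2 : c.toNat < (m.getD r.toNat []).length)
    (hget : pvGetCell m r c = x) (hx : x ≠ -1) :
    pvCnt x (pvSetCell m r c (-1)) + 1 = pvCnt x m := by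
  unfold pvSetCell
  unfold pvGetCell at hget
  rw [List.getD_eq_getElem m [] hr2] at hget hc2 ⊢
  rw [List.getD_eq_getElem _ 0 hc2] at hget
  have hrow : ((m[r.toNat]'hr2).set c.toNat (-1)).count x + 1 = (m[r.toNat]'hr2).count x := by
    rw [List.count_set hc2]
    have h1 : ((m[r.toNat]'hr2)[c.toNat] == x) = true := by simpa using hget
    have h2 : ((-1 : Int) == x) = false := by simpa using fun hh => hx hh.symm
    have hmem : x ∈ m[r.toNat]'hr2 := hget ▸ List.getElem_mem hc2
    have hpos : 0 < (m[r.toNat]'hr2).count x := List.count_pos_iff.2 hmem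
    simp [h1, h2]
    omega
  have := pvCnt_set x m r.toNat ((m[r.toNat]'hr2).set c.toNat (-1)) hr2
  omega

lemma pvCnt_le_tot (x : Int) (m : List (List Int)) :
    pvCnt x m ≤ (m.map List.length).sum := by
  induction m with
  | nil => simp [pvCnt]
  | cons row rest ih =>
    simp only [pvCnt, List.map_cons, List.sum_cons] at *
    exact Nat.add_le_add (List.count_le_length) ih

lemma pvH_range (rows cols r c : Int) (m : List (List Int))
    (hH : pvH rows cols (m.map List.length))
    (h1 : 0 ≤ r) (h2 : r < rows) (h3 : 0 ≤ c) (h4 : c < cols) :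
    r.toNat < m.length ∧ c.toNat < (m.getD r.toNat []).length := by
  obtain ⟨hlen, hcols⟩ := hH
  rw [List.length_map] at hlen
  have hr : r.toNat < m.length := by omega
  refine ⟨hr, ?_⟩
  have hmem : (m[r.toNat]'hr).length ∈ m.map List.length :=
    List.mem_map_of_mem (List.getElem_mem hr)
  have := hcols _ hmem
  rw [List.getD_eq_getElem m [] hr]
  omega

lemma pvDfs_shape (fuel : Nat) : ∀ (rows cols r c x : Int) (m : List (List Int)),
    (pvDfs fuel rows cols r c x m).map List.length = m.map List.length := by
  induction fuel with
  | zero => intro _ _ _ _ _ _; rfl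
  | succ f ih =>
    intro rows cols r c x m
    simp only [pvDfs]
    split_ifs with hg hv
    · rfl
    · rfl
    · rw [ih, ih, ih, ih, pvSetCell_shape]

lemma pvDfs_cnt_le (fuel : Nat) : ∀ (rows cols r c x : Int) (m : List (List Int)), x ≠ -1 →
    pvCnt x (pvDfs fuel rows cols r c x m) ≤ pvCnt x m := by
  induction fuel with
  | zero => intro _ _ _ _ _ _ _; exact Nat.le_refl _
  | succ f ih =>
    intro rows cols r c x m hx
    simp only [pvDfs]
    split_ifs with hg hv
    · exact Nat.le_refl _
    · exact Nat.le_refl _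
    · have h1 := pvCnt_setCell_le m r c x hx
      have h2 := ih rows cols (r-1) c x (pvSetCell m r c (-1)) hx
      have h3 := ih rows cols (r+1) c x (pvDfs f rows cols (r-1) c x (pvSetCell m r c (-1))) hx
      have h4 := ih rows cols r (c-1) x (pvDfs f rows cols (r+1) c x
        (pvDfs f rows cols (r-1) c x (pvSetCell m r c (-1)))) hx
      have h5 := ih rows cols r (c+1) x (pvDfs f rows cols r (c-1) x (pvDfs f rows cols (r+1) c x
        (pvDfs f rows cols (r-1) c x (pvSetCell m r c (-1))))) hx
      omega


-- step-unfolding helpers for the two loops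
lemma pvDfs_succ_fail (f : Nat) (rows cols r c x : Int) (m : List (List Int))
    (h : (r < 0 ∨ c < 0 ∨ rows ≤ r ∨ cols ≤ c) ∨ pvGetCell m r c ≠ x) :
    pvDfs (f+1) rows cols r c x m = m := by
  simp only [pvDfs]
  split_ifs with h1 h2
  · rfl
  · rfl
  · tauto

lemma pvDfs_succ_pass (f : Nat) (rows cols r c x : Int) (m : List (List Int))
    (h1 : ¬(r < 0 ∨ c < 0 ∨ rows ≤ r ∨ cols ≤ c)) (h2 : pvGetCell m r c = x) :
    pvDfs (f+1) rows cols r c x m =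
      pvDfs f rows cols r (c+1) x (pvDfs f rows cols r (c-1) x (pvDfs f rows cols (r+1) c x
        (pvDfs f rows cols (r-1) c x (pvSetCell m r c (-1))))) := by
  simp only [pvDfs]
  rw [if_neg h1, if_neg (by simp [h2])]

lemma pvStackRun_nil (fuel : Nat) (rows cols x : Int) (m : List (List Int)) :
    pvStackRun fuel rows cols x [] m = m := by cases fuel <;> rfl

lemma pvStackRun_succ_pass (f : Nat) (rows cols x i j : Int) (rest : List (Int × Int))
    (m : List (List Int))
    (h : 0 ≤ i ∧ i < rows ∧ 0 ≤ j ∧ j < cols ∧ pvGetCell m i j = x) :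
    pvStackRun (f+1) rows cols x ((i,j) :: rest) m =
      pvStackRun f rows cols x ((i-1,j) :: (i+1,j) :: (i,j-1) :: (i,j+1) :: rest)
        (pvSetCell m i j (-1)) := by
  simp only [pvStackRun]
  rw [if_pos h]

lemma pvStackRun_succ_fail (f : Nat) (rows cols x i j : Int) (rest : List (Int × Int))
    (m : List (List Int))
    (h : ¬(0 ≤ i ∧ i < rows ∧ 0 ≤ j ∧ j < cols ∧ pvGetCell m i j = x)) :
    pvStackRun (f+1) rows cols x ((i,j) :: rest) m = pvStackRun f rows cols x rest m := by
  simp only [pvStackRun]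
  rw [if_neg h]

lemma pvDfs_stable (fuel : Nat) : ∀ (g : Nat) (rows cols r c x : Int) (m : List (List Int)),
    x ≠ -1 → pvH rows cols (m.map List.length) →
    pvCnt x m < fuel → pvCnt x m < g →
    pvDfs fuel rows cols r c x m = pvDfs g rows cols r c x m := by
  induction fuel with
  | zero => intro g rows cols r c x m _ _ hf _; omega
  | succ f ih =>
    intro g rows cols r c x m hx hH hf hg
    obtain ⟨g', rfl⟩ : ∃ g', g = g' + 1 := ⟨g - 1, by omega⟩
    by_cases h1 : r < 0 ∨ c < 0 ∨ rows ≤ r ∨ cols ≤ c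
    · rw [pvDfs_succ_fail f _ _ _ _ _ _ (Or.inl h1),
        pvDfs_succ_fail g' _ _ _ _ _ _ (Or.inl h1)]
    by_cases h2 : pvGetCell m r c = x
    case neg =>
      rw [pvDfs_succ_fail f _ _ _ _ _ _ (Or.inr h2),
        pvDfs_succ_fail g' _ _ _ _ _ _ (Or.inr h2)]
    case pos =>
      have hb : ¬(r < 0 ∨ c < 0 ∨ rows ≤ r ∨ cols ≤ c) := h1
      have hrange := pvH_range rows cols r c m hH (by omega) (by omega) (by omega) (by omega)
      have hdec := pvCnt_setCell m r c x hrange.1 hrange.2 h2 hx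
      rw [pvDfs_succ_pass f _ _ _ _ _ _ hb h2, pvDfs_succ_pass g' _ _ _ _ _ _ hb h2]
      set m1 := pvSetCell m r c (-1) with hm1def
      have hsh1 : m1.map List.length = m.map List.length := pvSetCell_shape m r c (-1)
      have hH1 : pvH rows cols (m1.map List.length) := by rw [hsh1]; exact hH
      have e1 : pvDfs f rows cols (r-1) c x m1 = pvDfs g' rows cols (r-1) c x m1 :=
        ih g' rows cols (r-1) c x m1 hx hH1 (by omega) (by omega)
      rw [e1]
      set m2 := pvDfs g' rows cols (r-1) c x m1 with hm2def
      have hc2 : pvCnt x m2 ≤ pvCnt x m1 := pvDfs_cnt_le g' rows cols (r-1) c x m1 hx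
      have hsh2 : m2.map List.length = m.map List.length := by
        rw [hm2def, pvDfs_shape g', hsh1]
      have hH2 : pvH rows cols (m2.map List.length) := by rw [hsh2]; exact hH
      have e2 : pvDfs f rows cols (r+1) c x m2 = pvDfs g' rows cols (r+1) c x m2 :=
        ih g' rows cols (r+1) c x m2 hx hH2 (by omega) (by omega)
      rw [e2]
      set m3 := pvDfs g' rows cols (r+1) c x m2 with hm3def
      have hc3 : pvCnt x m3 ≤ pvCnt x m2 := pvDfs_cnt_le g' rows cols (r+1) c x m2 hx
      have hsh3 : m3.map List.length = m.map List.length := by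
        rw [hm3def, pvDfs_shape g', hsh2]
      have hH3 : pvH rows cols (m3.map List.length) := by rw [hsh3]; exact hH
      have e3 : pvDfs f rows cols r (c-1) x m3 = pvDfs g' rows cols r (c-1) x m3 :=
        ih g' rows cols r (c-1) x m3 hx hH3 (by omega) (by omega)
      rw [e3]
      set m4 := pvDfs g' rows cols r (c-1) x m3 with hm4def
      have hc4 : pvCnt x m4 ≤ pvCnt x m3 := pvDfs_cnt_le g' rows cols r (c-1) x m3 hx
      have hsh4 : m4.map List.length = m.map List.length := by
        rw [hm4def, pvDfs_shape g', hsh3]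
      have hH4 : pvH rows cols (m4.map List.length) := by rw [hsh4]; exact hH
      exact ih g' rows cols r (c+1) x m4 hx hH4 (by omega) (by omega)

lemma pvStackRun_stable (fuel : Nat) : ∀ (g : Nat) (rows cols x : Int)
    (st : List (Int × Int)) (m : List (List Int)),
    x ≠ -1 → pvH rows cols (m.map List.length) →
    5 * pvCnt x m + st.length < fuel → 5 * pvCnt x m + st.length < g →
    pvStackRun fuel rows cols x st m = pvStackRun g rows cols x st m := by
  induction fuel with
  | zero => intro g rows cols x st m _ _ hf _; omega
  | succ f ih =>
    intro g rows cols x st m hx hH hf hg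
    obtain ⟨g', rfl⟩ : ∃ g', g = g' + 1 := ⟨g - 1, by omega⟩
    cases st with
    | nil => rw [pvStackRun_nil, pvStackRun_nil]
    | cons p rest =>
      obtain ⟨i, j⟩ := p
      rw [List.length_cons] at hf hg
      by_cases hp : 0 ≤ i ∧ i < rows ∧ 0 ≤ j ∧ j < cols ∧ pvGetCell m i j = x
      · have hrange := pvH_range rows cols i j m hH hp.1 hp.2.1 hp.2.2.1 hp.2.2.2.1
        have hdec := pvCnt_setCell m i j x hrange.1 hrange.2 hp.2.2.2.2 hx
        rw [pvStackRun_succ_pass f _ _ _ _ _ _ _ hp, pvStackRun_succ_pass g' _ _ _ _ _ _ _ hp]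
        have hH1 : pvH rows cols ((pvSetCell m i j (-1)).map List.length) := by
          rw [pvSetCell_shape]; exact hH
        exact ih g' rows cols x _ _ hx hH1 (by simp; omega) (by simp; omega)
      · rw [pvStackRun_succ_fail f _ _ _ _ _ _ _ hp, pvStackRun_succ_fail g' _ _ _ _ _ _ _ hp]
        exact ih g' rows cols x rest m hx hH (by omega) (by omega)

-- canonical-fuel versions (proof devices only)
def pvDF (rows cols x r c : Int) (m : List (List Int)) : List (List Int) :=
  pvDfs (pvCnt x m + 1) rows cols r c x m

def pvSR (rows cols x : Int) (st : List (Int × Int)) (m : List (List Int)) : List (List Int) :=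
  pvStackRun (5 * pvCnt x m + st.length + 1) rows cols x st m


-- the common non-passing case of the bridge: the popped cell is rejected on both sides
lemma pvBridge_fail (rows cols x r c : Int) (st : List (Int × Int)) (m : List (List Int))
    (hp : ¬(0 ≤ r ∧ r < rows ∧ 0 ≤ c ∧ c < cols ∧ pvGetCell m r c = x)) :
    pvSR rows cols x ((r, c) :: st) m = pvSR rows cols x st (pvDF rows cols x r c m) := by
  have hdf : pvDF rows cols x r c m = m := by
    unfold pvDF
    by_cases hb : r < 0 ∨ c < 0 ∨ rows ≤ r ∨ cols ≤ c
    · exact pvDfs_succ_fail _ _ _ _ _ _ _ (Or.inl hb)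
    · refine pvDfs_succ_fail _ _ _ _ _ _ _ (Or.inr fun hv => hp ?_)
      exact ⟨by omega, by omega, by omega, by omega, hv⟩
  rw [hdf]
  unfold pvSR
  rw [show 5 * pvCnt x m + ((r, c) :: st).length + 1 = (5 * pvCnt x m + st.length + 1) + 1 by
    simp only [List.length_cons]; omega]
  rw [pvStackRun_succ_fail _ _ _ _ _ _ _ _ hp]

-- the bridge: popping one cell and flooding it is the same as running A's dfs from that cell
lemma pvSR_nil (rows cols x : Int) (m : List (List Int)) : pvSR rows cols x [] m = m := rfl

lemma pvBridge (n : Nat) : ∀ (rows cols x r c : Int) (st : List (Int × Int))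
    (m : List (List Int)), pvCnt x m ≤ n → x ≠ -1 → pvH rows cols (m.map List.length) →
    pvSR rows cols x ((r, c) :: st) m = pvSR rows cols x st (pvDF rows cols x r c m) := by
  induction n with
  | zero =>
    intro rows cols x r c st m hn hx hH
    by_cases hp : 0 ≤ r ∧ r < rows ∧ 0 ≤ c ∧ c < cols ∧ pvGetCell m r c = x
    · exfalso
      have hrange := pvH_range rows cols r c m hH hp.1 hp.2.1 hp.2.2.1 hp.2.2.2.1
      have hdec := pvCnt_setCell m r c x hrange.1 hrange.2 hp.2.2.2.2 hx
      omega
    · exact pvBridge_fail rows cols x r c st m hp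
  | succ N ih =>
    intro rows cols x r c st m hn hx hH
    by_cases hp : 0 ≤ r ∧ r < rows ∧ 0 ≤ c ∧ c < cols ∧ pvGetCell m r c = x
    case neg => exact pvBridge_fail rows cols x r c st m hp
    case pos =>
      have hrange := pvH_range rows cols r c m hH hp.1 hp.2.1 hp.2.2.1 hp.2.2.2.1
      have hdec := pvCnt_setCell m r c x hrange.1 hrange.2 hp.2.2.2.2 hx
      have hb : ¬(r < 0 ∨ c < 0 ∨ rows ≤ r ∨ cols ≤ c) := by
        obtain ⟨a1, a2, a3, a4, _⟩ := hp; omega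
      have hval := hp.2.2.2.2
      set m1 := pvSetCell m r c (-1) with hm1def
      have hsh1 : m1.map List.length = m.map List.length := pvSetCell_shape m r c (-1)
      have hH1 : pvH rows cols (m1.map List.length) := by rw [hsh1]; exact hH
      have step : pvSR rows cols x ((r, c) :: st) m
          = pvSR rows cols x ((r-1,c) :: (r+1,c) :: (r,c-1) :: (r,c+1) :: st) m1 := by
        unfold pvSR
        rw [show 5 * pvCnt x m + ((r, c) :: st).length + 1
            = (5 * pvCnt x m + st.length + 1) + 1 by simp only [List.length_cons]; omega]
        rw [pvStackRun_succ_pass _ _ _ _ _ _ _ _ hp, ← hm1def]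
        exact pvStackRun_stable _ _ rows cols x _ m1 hx hH1
          (by simp only [List.length_cons]; omega) (by simp only [List.length_cons]; omega)
      rw [step]
      have hn1 : pvCnt x m1 ≤ N := by omega
      rw [ih rows cols x (r-1) c ((r+1,c) :: (r,c-1) :: (r,c+1) :: st) m1 hn1 hx hH1]
      set m2 := pvDF rows cols x (r-1) c m1 with hm2def
      have hsh2 : m2.map List.length = m.map List.length := by
        rw [hm2def]; unfold pvDF; rw [pvDfs_shape _ rows cols (r-1) c x m1, hsh1]
      have hH2 : pvH rows cols (m2.map List.length) := by rw [hsh2]; exact hH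
      have hc2 : pvCnt x m2 ≤ pvCnt x m1 := by
        rw [hm2def]; unfold pvDF; exact pvDfs_cnt_le _ rows cols (r-1) c x m1 hx
      have hn2 : pvCnt x m2 ≤ N := by omega
      rw [ih rows cols x (r+1) c ((r,c-1) :: (r,c+1) :: st) m2 hn2 hx hH2]
      set m3 := pvDF rows cols x (r+1) c m2 with hm3def
      have hsh3 : m3.map List.length = m.map List.length := by
        rw [hm3def]; unfold pvDF; rw [pvDfs_shape _ rows cols (r+1) c x m2, hsh2]
      have hH3 : pvH rows cols (m3.map List.length) := by rw [hsh3]; exact hH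
      have hc3 : pvCnt x m3 ≤ pvCnt x m2 := by
        rw [hm3def]; unfold pvDF; exact pvDfs_cnt_le _ rows cols (r+1) c x m2 hx
      have hn3 : pvCnt x m3 ≤ N := by omega
      rw [ih rows cols x r (c-1) ((r,c+1) :: st) m3 hn3 hx hH3]
      set m4 := pvDF rows cols x r (c-1) m3 with hm4def
      have hsh4 : m4.map List.length = m.map List.length := by
        rw [hm4def]; unfold pvDF; rw [pvDfs_shape _ rows cols r (c-1) x m3, hsh3]
      have hH4 : pvH rows cols (m4.map List.length) := by rw [hsh4]; exact hH
      have hc4 : pvCnt x m4 ≤ pvCnt x m3 := by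
        rw [hm4def]; unfold pvDF; exact pvDfs_cnt_le _ rows cols r (c-1) x m3 hx
      have hn4 : pvCnt x m4 ≤ N := by omega
      rw [ih rows cols x r (c+1) st m4 hn4 hx hH4]
      have hDF : pvDF rows cols x r c m = pvDF rows cols x r (c+1) m4 := by
        show pvDfs (pvCnt x m + 1) rows cols r c x m = _
        rw [show pvCnt x m + 1 = (pvCnt x m1 + 1) + 1 from by omega,
          pvDfs_succ_pass (pvCnt x m1 + 1) rows cols r c x m hb hval, ← hm1def]
        rw [show pvDfs (pvCnt x m1 + 1) rows cols (r-1) c x m1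
            = pvDF rows cols x (r-1) c m1 from rfl, ← hm2def]
        rw [show pvDfs (pvCnt x m1 + 1) rows cols (r+1) c x m2
            = pvDF rows cols x (r+1) c m2 from by
          unfold pvDF
          exact pvDfs_stable _ _ rows cols (r+1) c x m2 hx hH2 (by omega) (by omega), ← hm3def]
        rw [show pvDfs (pvCnt x m1 + 1) rows cols r (c-1) x m3
            = pvDF rows cols x r (c-1) m3 from by
          unfold pvDF
          exact pvDfs_stable _ _ rows cols r (c-1) x m3 hx hH3 (by omega) (by omega), ← hm4def]
        rw [show pvDfs (pvCnt x m1 + 1) rows cols r (c+1) x m4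
            = pvDF rows cols x r (c+1) m4 from by
          unfold pvDF
          exact pvDfs_stable _ _ rows cols r (c+1) x m4 hx hH4 (by omega) (by omega)]
      rw [hDF]

lemma pvFoldl_congr {A S : Type} (Inv : S → Prop) (fA fB : S → A → S)
    (hstep : ∀ s a, Inv s → fA s a = fB s a ∧ Inv (fA s a)) :
    ∀ (l : List A) (s : S), Inv s → l.foldl fA s = l.foldl fB s ∧ Inv (l.foldl fA s) := by
  intro l
  induction l with
  | nil => intro s hs; exact ⟨rfl, hs⟩
  | cons a t iht =>
    intro s hs
    have h := hstep s a hs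
    simp only [List.foldl_cons]
    refine ⟨?_, (iht _ h.2).2⟩
    rw [← h.1]
    exact (iht _ h.2).1

lemma pvFlood_eq (rows cols x r c : Int) (m : List (List Int)) (tot : Nat)
    (hx : x ≠ -1) (hH : pvH rows cols (m.map List.length)) (hcn : pvCnt x m ≤ tot) :
    pvDfs (tot + 2) rows cols r c x m = pvStackRun (5 * tot + 2) rows cols x [(r, c)] m := by
  have ha : pvDfs (tot + 2) rows cols r c x m = pvDF rows cols x r c m := by
    unfold pvDF
    exact pvDfs_stable _ _ rows cols r c x m hx hH (by omega) (by omega)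
  have hb : pvStackRun (5 * tot + 2) rows cols x [(r, c)] m = pvSR rows cols x [(r, c)] m :=
    pvStackRun_stable _ _ rows cols x _ m hx hH
      (by simp only [List.length_cons, List.length_nil]; omega)
      (by simp only [List.length_cons, List.length_nil]; omega)
  rw [ha, hb, pvBridge (pvCnt x m) rows cols x r c [] m (le_refl _) hx hH, pvSR_nil]


lemma pvShape_of_cols (matrix : List (List Int))
    (hcols : ∀ row ∈ matrix, (matrix.headD []).length ≤ row.length)
    (sh : List Nat) (hsh : sh = matrix.map List.length) :
    pvH (matrix.length : Int) ((matrix.headD []).length : Int) sh := by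
  subst hsh
  refine ⟨by simp, ?_⟩
  intro n hn
  obtain ⟨row, hrow, rfl⟩ := List.mem_map.1 hn
  exact_mod_cast hcols row hrow

lemma pvStep_eq (matrix : List (List Int))
    (hcols : ∀ row ∈ matrix, (matrix.headD []).length ≤ row.length)
    (r c : Nat) (s : List (List Int) × PySem.Dict Int Int)
    (hInv : s.1.map List.length = matrix.map List.length) :
    (if pvGetCell s.1 (r : Int) (c : Int) ≠ -1 then
        (pvDfs ((matrix.map List.length).sum + 2) (matrix.length : Int)
            ((matrix.headD []).length : Int) (r : Int) (c : Int)
            (pvGetCell s.1 (r : Int) (c : Int)) s.1,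
          s.2.insert (pvGetCell s.1 (r : Int) (c : Int))
            (s.2.getD (pvGetCell s.1 (r : Int) (c : Int)) 0 + 1))
      else s)
      = (if pvGetCell s.1 (r : Int) (c : Int) = -1 then s
      else
        (pvStackRun (5 * (matrix.map List.length).sum + 2) (matrix.length : Int)
            ((matrix.headD []).length : Int) (pvGetCell s.1 (r : Int) (c : Int))
            [((r : Int), (c : Int))] s.1,
          s.2.insert (pvGetCell s.1 (r : Int) (c : Int))
            (s.2.getD (pvGetCell s.1 (r : Int) (c : Int)) 0 + 1))) := by
  by_cases hcol : pvGetCell s.1 (r : Int) (c : Int) = -1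
  · rw [if_neg (not_not_intro hcol), if_pos hcol]
  · rw [if_pos hcol, if_neg hcol]
    have hH := pvShape_of_cols matrix hcols (s.1.map List.length) hInv
    have hcn : pvCnt (pvGetCell s.1 (r : Int) (c : Int)) s.1 ≤ (matrix.map List.length).sum := by
      have h := pvCnt_le_tot (pvGetCell s.1 (r : Int) (c : Int)) s.1
      rw [hInv] at h
      exact h
    rw [pvFlood_eq _ _ _ _ _ _ _ hcol hH hcn]

lemma pvStepA_inv (matrix : List (List Int)) (r c : Nat)
    (s : List (List Int) × PySem.Dict Int Int)
    (hInv : s.1.map List.length = matrix.map List.length) :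
    ((if pvGetCell s.1 (r : Int) (c : Int) ≠ -1 then
        (pvDfs ((matrix.map List.length).sum + 2) (matrix.length : Int)
            ((matrix.headD []).length : Int) (r : Int) (c : Int)
            (pvGetCell s.1 (r : Int) (c : Int)) s.1,
          s.2.insert (pvGetCell s.1 (r : Int) (c : Int))
            (s.2.getD (pvGetCell s.1 (r : Int) (c : Int)) 0 + 1))
      else s)).1.map List.length = matrix.map List.length := by
  by_cases hcol : pvGetCell s.1 (r : Int) (c : Int) = -1
  · rw [if_neg (not_not_intro hcol)]
    exact hInv
  · rw [if_pos hcol]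
    show (pvDfs _ _ _ _ _ _ s.1).map List.length = _
    rw [pvDfs_shape]
    exact hInv

lemma pvSolve_eq (matrix : List (List Int)) (hm : ¬ matrix = [])
    (hcols : ∀ row ∈ matrix, (matrix.headD []).length ≤ row.length) :
    solve matrix = solve_alt matrix := by
  simp only [solve, solve_alt, if_neg hm]
  have hfold := pvFoldl_congr
    (Inv := fun (s : List (List Int) × PySem.Dict Int Int) =>
      s.1.map List.length = matrix.map List.length)
    (fA := fun s (r : Nat) =>
      List.foldl (fun (s : List (List Int) × PySem.Dict Int Int) (c : Nat) =>
        (if pvGetCell s.1 (r : Int) (c : Int) ≠ -1 then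
        (pvDfs ((matrix.map List.length).sum + 2) (matrix.length : Int)
            ((matrix.headD []).length : Int) (r : Int) (c : Int)
            (pvGetCell s.1 (r : Int) (c : Int)) s.1,
          s.2.insert (pvGetCell s.1 (r : Int) (c : Int))
            (s.2.getD (pvGetCell s.1 (r : Int) (c : Int)) 0 + 1))
      else s)) s (List.range (matrix.headD []).length))
    (fB := fun s (r : Nat) =>
      List.foldl (fun (s : List (List Int) × PySem.Dict Int Int) (c : Nat) =>
        (if pvGetCell s.1 (r : Int) (c : Int) = -1 then s
      else
        (pvStackRun (5 * (matrix.map List.length).sum + 2) (matrix.length : Int)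
            ((matrix.headD []).length : Int) (pvGetCell s.1 (r : Int) (c : Int))
            [((r : Int), (c : Int))] s.1,
          s.2.insert (pvGetCell s.1 (r : Int) (c : Int))
            (s.2.getD (pvGetCell s.1 (r : Int) (c : Int)) 0 + 1)))) s (List.range (matrix.headD []).length))
    (fun s r hs =>
      pvFoldl_congr
        (Inv := fun (s : List (List Int) × PySem.Dict Int Int) =>
          s.1.map List.length = matrix.map List.length)
        (fA := fun (s : List (List Int) × PySem.Dict Int Int) (c : Nat) => (if pvGetCell s.1 (r : Int) (c : Int) ≠ -1 then
        (pvDfs ((matrix.map List.length).sum + 2) (matrix.length : Int)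
            ((matrix.headD []).length : Int) (r : Int) (c : Int)
            (pvGetCell s.1 (r : Int) (c : Int)) s.1,
          s.2.insert (pvGetCell s.1 (r : Int) (c : Int))
            (s.2.getD (pvGetCell s.1 (r : Int) (c : Int)) 0 + 1))
      else s))
        (fB := fun (s : List (List Int) × PySem.Dict Int Int) (c : Nat) => (if pvGetCell s.1 (r : Int) (c : Int) = -1 then s
      else
        (pvStackRun (5 * (matrix.map List.length).sum + 2) (matrix.length : Int)
            ((matrix.headD []).length : Int) (pvGetCell s.1 (r : Int) (c : Int))
            [((r : Int), (c : Int))] s.1,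
          s.2.insert (pvGetCell s.1 (r : Int) (c : Int))
            (s.2.getD (pvGetCell s.1 (r : Int) (c : Int)) 0 + 1))))
        (fun s c hsc => ⟨pvStep_eq matrix hcols r c s hsc, pvStepA_inv matrix r c s hsc⟩)
        (List.range (matrix.headD []).length) s hs)
    (List.range matrix.length) (matrix, PySem.Dict.empty) rfl
  rw [hfold.1]


-- ===== VERDICT (by name: the statement is the Claim_ definition above) =====
theorem solve_spec : Claim_equal_solve := by
  intro matrix _hdom hpre
  unfold Spec_solve
  by_cases hm : matrix = []
  · subst hm; rfl
  · rcases hpre with h | ⟨hcols, _⟩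
    · exact absurd h hm
    · exact pvSolve_eq matrix hm hcols
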